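-- pv_equiv track=rewrite | github.com/Danieloun/Uni-Programmazione | HACKATON/prob2.py | trovare_codici_sblocco
-- ===== SOURCE A (Python) =====
-- def trovare_codici_sblocco(K):
--     codici_sblocco = []
--     for X in range(1, K+1):
--         for Y in range(1, K+1):
--             for Z in range(1, K+1):
--                 if X * Y + Z == K:
--                     codici_sblocco.append((X, Y, Z))
--     return codici_sblocco
-- ===== SOURCE B (Python) =====
-- def trovare_codici_sblocco(K):
--     out = []
--     X = 1
--     while X < K:
--         Y, P = 1, X
--         while P < K:
--             out.append((X, Y, K - P))
--             Y += 1
--             P += X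
--         X += 1
--     return out
-- ===== Notes on version B (the rewrite author's own statement) =====
-- stated objective: faster
-- what changed: B replaces A's triple brute-force scan by two while loops that walk the products P = X*Y additively (P += X) and read off Z = K - P directly, with no inner Z scan and no division, giving O(K log K) instead of O(K^3).
import Mathlib
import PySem

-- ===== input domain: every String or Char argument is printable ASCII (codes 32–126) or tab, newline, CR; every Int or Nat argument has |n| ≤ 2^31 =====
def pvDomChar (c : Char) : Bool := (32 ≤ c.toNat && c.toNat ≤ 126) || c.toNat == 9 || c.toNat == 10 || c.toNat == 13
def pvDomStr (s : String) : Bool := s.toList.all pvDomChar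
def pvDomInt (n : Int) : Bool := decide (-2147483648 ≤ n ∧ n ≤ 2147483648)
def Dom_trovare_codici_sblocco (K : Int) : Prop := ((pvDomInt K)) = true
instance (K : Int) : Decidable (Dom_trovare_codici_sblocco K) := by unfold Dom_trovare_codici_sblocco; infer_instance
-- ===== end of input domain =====

-- B drops A's two inner brute-force scans: it walks the products P = X*Y additively (P += X) with two
-- while loops, emitting (X, Y, K - P) while P < K, turning O(K^3) into O(K log K); same values, same order.

-- ===== PORT A =====
def trovare_codici_sblocco (K : Int) : List (List Int) :=
  (PySem.List.pyRange 1 (K + 1) 1).foldl (fun acc X =>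
    (PySem.List.pyRange 1 (K + 1) 1).foldl (fun acc Y =>
      (PySem.List.pyRange 1 (K + 1) 1).foldl (fun acc Z =>
        if X * Y + Z = K then acc ++ [[X, Y, Z]] else acc) acc) acc) []

-- ===== PORT B =====
-- inner while loop: while P < K: emit (X, Y, K-P); Y += 1; P += X.  (0 < X proves termination)
def pvInnerB (K X : Int) (hX : 0 < X) (Y P : Int) : List (List Int) :=
  if _h : P < K then [X, Y, K - P] :: pvInnerB K X hX (Y + 1) (P + X) else []
termination_by (K - P).toNat
decreasing_by omega

-- outer while loop: while X < K: run the inner loop from Y = 1, P = X; X += 1.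
def pvOuterB (K X : Int) (hX : 0 < X) : List (List Int) :=
  if h : X < K then pvInnerB K X hX 1 X ++ pvOuterB K (X + 1) (by omega) else []
termination_by (K - X).toNat
decreasing_by omega

def trovare_codici_sblocco_alt (K : Int) : List (List Int) :=
  pvOuterB K 1 (by norm_num)

-- ===== PRECONDITION & SPEC =====
def Spec_trovare_codici_sblocco (K : Int) (out : List (List Int)) : Prop := out = trovare_codici_sblocco_alt K
instance (K : Int) (out : List (List Int)) : Decidable (Spec_trovare_codici_sblocco K out) := by unfold Spec_trovare_codici_sblocco; infer_instance

-- ===== CLAIM (what is proved, stated in full; the proofs are below) =====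
def Claim_equal_trovare_codici_sblocco : Prop := ∀ (K : Int), Dom_trovare_codici_sblocco K → Spec_trovare_codici_sblocco K (trovare_codici_sblocco K)

-- ===== LEMMAS AND PROOFS =====

-- A's inner Z scan, as a filter, keeps exactly the single value K - c when it lies in the range.
lemma pv_filter_range_singleton (a b c K : Int) :
    (PySem.List.pyRange a b 1).filter (fun z => decide (c + z = K))
      = if a ≤ K - c ∧ K - c < b then [K - c] else [] := by
  by_cases h : a ≤ K - c ∧ K - c < b
  · rw [PySem.List.pyRange_one_append a (K - c) b (by omega) (by omega),
      PySem.List.pyRange_one_cons (by omega : K - c < b)]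
    simp only [List.filter_append, List.filter_cons]
    rw [List.filter_eq_nil_iff.mpr, List.filter_eq_nil_iff.mpr]
    · simp; omega
    · intro x hx; rw [PySem.List.mem_pyRange_one] at hx; simp; omega
    · intro x hx; rw [PySem.List.mem_pyRange_one] at hx; simp; omega
  · rw [if_neg h, List.filter_eq_nil_iff]
    intro x hx; rw [PySem.List.mem_pyRange_one] at hx; simp; omega

-- A range filtered by an upper bound is the truncated range.
lemma pv_filter_range_le (a b m : Int) (h1 : a ≤ m + 1) (h2 : m + 1 ≤ b) :
    (PySem.List.pyRange a b 1).filter (fun y => decide (y ≤ m))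
      = PySem.List.pyRange a (m + 1) 1 := by
  rw [PySem.List.pyRange_one_append a (m + 1) b h1 h2, List.filter_append]
  rw [List.filter_eq_self.mpr, List.filter_eq_nil_iff.mpr, List.append_nil]
  · intro x hx; rw [PySem.List.mem_pyRange_one] at hx; simp; omega
  · intro x hx; rw [PySem.List.mem_pyRange_one] at hx; simp; omega

-- 'append g y when p y' over a list is map-over-filter.
lemma pv_flatMap_ite_singleton {α β : Type} (p : α → Prop) [DecidablePred p] (g : α → β) (l : List α) :
    l.flatMap (fun y => if p y then [g y] else []) = (l.filter (fun y => p y)).map g := by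
  induction l with
  | nil => simp
  | cons a t ih => simp only [List.flatMap_cons, List.filter_cons, ih]; split_ifs <;> simp_all

-- The row of solutions for one X, the common form both programs reduce to.
def pvRow (K X : Int) : List (List Int) :=
  (PySem.List.pyRange 1 (PySem.Int.floordiv (K - 1) X + 1) 1).map (fun Y => [X, Y, K - X * Y])

-- A's two inner loops for one X (with 1 ≤ X, over Y,Z in 1..K) produce exactly pvRow K X.
lemma pv_inner_eq_row (K X : Int) (hK : 0 < K) (hX : 1 ≤ X) :
    ((PySem.List.pyRange 1 (K + 1) 1).flatMap (fun Y =>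
      ((PySem.List.pyRange 1 (K + 1) 1).filter (fun z => decide (X * Y + z = K))).map
        (fun z => [X, Y, z]))) = pvRow K X := by
  have hm0 : 0 ≤ PySem.Int.floordiv (K - 1) X :=
    (PySem.Int.le_floordiv_iff_mul_le (by omega)).mpr (by nlinarith)
  have hmK : PySem.Int.floordiv (K - 1) X < K :=
    (PySem.Int.floordiv_lt_iff_lt_mul (by omega)).mpr (by nlinarith)
  have hstep : ∀ Y ∈ PySem.List.pyRange 1 (K + 1) 1,
      ((PySem.List.pyRange 1 (K + 1) 1).filter (fun z => decide (X * Y + z = K))).map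
        (fun z => ([X, Y, z] : List Int))
        = if Y ≤ PySem.Int.floordiv (K - 1) X then [[X, Y, K - X * Y]] else [] := by
    intro Y hY
    rw [PySem.List.mem_pyRange_one] at hY
    rw [pv_filter_range_singleton 1 (K + 1) (X * Y) K]
    have hiff : (1 ≤ K - X * Y ∧ K - X * Y < K + 1) ↔ Y ≤ PySem.Int.floordiv (K - 1) X := by
      rw [PySem.Int.le_floordiv_iff_mul_le (by omega)]
      constructor
      · intro h; nlinarith
      · intro h; constructor <;> nlinarith
    by_cases h : Y ≤ PySem.Int.floordiv (K - 1) X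
    · rw [if_pos (hiff.mpr h), if_pos h]; simp
    · rw [if_neg (fun hc => h (hiff.mp hc)), if_neg h]; rfl
  rw [List.flatMap_congr hstep,
    pv_flatMap_ite_singleton (fun Y => Y ≤ PySem.Int.floordiv (K - 1) X)
      (fun Y => ([X, Y, K - X * Y] : List Int)),
    pv_filter_range_le 1 (K + 1) (PySem.Int.floordiv (K - 1) X) (by omega) (by omega)]
  rfl

-- B's inner while loop, entered at P = X*Y, lists exactly the tail of pvRow K X from Y on.
lemma pvInnerB_eq (K X : Int) (hX : 0 < X) (Y : Int) :
    pvInnerB K X hX Y (X * Y)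
      = (PySem.List.pyRange Y (PySem.Int.floordiv (K - 1) X + 1) 1).map
          (fun y => [X, y, K - X * y]) := by
  rw [pvInnerB]
  by_cases h : X * Y < K
  · have hY : Y ≤ PySem.Int.floordiv (K - 1) X :=
      (PySem.Int.le_floordiv_iff_mul_le (by omega)).mpr (by rw [mul_comm]; omega)
    rw [dif_pos h, PySem.List.pyRange_one_cons (by omega : Y < PySem.Int.floordiv (K - 1) X + 1)]
    have hrec := pvInnerB_eq K X hX (Y + 1)
    rw [show X * Y + X = X * (Y + 1) by ring, hrec]
    rfl
  · have hY : ¬ Y ≤ PySem.Int.floordiv (K - 1) X := by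
      intro hc
      have := (PySem.Int.le_floordiv_iff_mul_le (by omega)).mp hc
      rw [mul_comm] at this; omega
    rw [dif_neg h, PySem.List.pyRange_one_eq_nil (by omega)]
    rfl
termination_by (K - X * Y).toNat
decreasing_by
  have hx : X * Y + X = X * (Y + 1) := by ring
  omega

-- B's outer while loop is the flatMap of pvRow over X..K-1.
lemma pvOuterB_eq (K X : Int) (hX : 0 < X) :
    pvOuterB K X hX = (PySem.List.pyRange X K 1).flatMap (pvRow K) := by
  rw [pvOuterB]
  by_cases h : X < K
  · rw [dif_pos h, PySem.List.pyRange_one_cons h, List.flatMap_cons,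
      pvOuterB_eq K (X + 1) (by omega)]
    have : pvInnerB K X hX 1 X = pvRow K X := by
      have := pvInnerB_eq K X hX 1
      rw [mul_one] at this
      exact this
    rw [this]
  · rw [dif_neg h, PySem.List.pyRange_one_eq_nil (by omega)]
    rfl
termination_by (K - X).toNat
decreasing_by omega

-- ===== VERDICT (by name: the statement is the Claim_ definition above) =====
theorem trovare_codici_sblocco_spec : Claim_equal_trovare_codici_sblocco := by
  intro K _
  unfold Spec_trovare_codici_sblocco trovare_codici_sblocco trovare_codici_sblocco_alt
  rw [pvOuterB_eq]
  by_cases hK : K ≤ 0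
  · rw [PySem.List.pyRange_one_eq_nil (by omega : K + 1 ≤ 1),
      PySem.List.pyRange_one_eq_nil (by omega : K ≤ 1)]
    rfl
  replace hK : 0 < K := by omega
  -- A: rewrite the three nested loops into flatMap over filtered ranges, then into pvRow
  have hA : (PySem.List.pyRange 1 (K + 1) 1).foldl (fun acc X =>
      (PySem.List.pyRange 1 (K + 1) 1).foldl (fun acc Y =>
        (PySem.List.pyRange 1 (K + 1) 1).foldl (fun acc Z =>
          if X * Y + Z = K then acc ++ [[X, Y, Z]] else acc) acc) acc) []
      = (PySem.List.pyRange 1 (K + 1) 1).flatMap (pvRow K) := by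
    have hbody : ∀ (acc : List (List Int)) X, X ∈ PySem.List.pyRange 1 (K + 1) 1 →
        (PySem.List.pyRange 1 (K + 1) 1).foldl (fun acc Y =>
          (PySem.List.pyRange 1 (K + 1) 1).foldl (fun acc Z =>
            if X * Y + Z = K then acc ++ [[X, Y, Z]] else acc) acc) acc
          = acc ++ pvRow K X := by
      intro acc X hX
      rw [PySem.List.mem_pyRange_one] at hX
      have hz : ∀ (acc : List (List Int)) Y,
          (PySem.List.pyRange 1 (K + 1) 1).foldl (fun acc Z =>
            if X * Y + Z = K then acc ++ [[X, Y, Z]] else acc) acc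
            = acc ++ ((PySem.List.pyRange 1 (K + 1) 1).filter
                (fun z => decide (X * Y + z = K))).map (fun z => [X, Y, z]) := by
        intro acc Y
        have h := PySem.List.foldl_append_if (p := fun z => decide (X * Y + z = K))
          (f := fun z => ([X, Y, z] : List Int)) (l := PySem.List.pyRange 1 (K + 1) 1) (acc := acc)
        simpa using h
      calc (PySem.List.pyRange 1 (K + 1) 1).foldl (fun acc Y =>
            (PySem.List.pyRange 1 (K + 1) 1).foldl (fun acc Z =>
              if X * Y + Z = K then acc ++ [[X, Y, Z]] else acc) acc) acc
          = (PySem.List.pyRange 1 (K + 1) 1).foldl (fun acc Y =>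
              acc ++ ((PySem.List.pyRange 1 (K + 1) 1).filter
                (fun z => decide (X * Y + z = K))).map (fun z => [X, Y, z])) acc := by
            have hfun : (fun (acc : List (List Int)) Y =>
                (PySem.List.pyRange 1 (K + 1) 1).foldl (fun acc Z =>
                  if X * Y + Z = K then acc ++ [[X, Y, Z]] else acc) acc)
                = fun acc Y => acc ++ ((PySem.List.pyRange 1 (K + 1) 1).filter
                    (fun z => decide (X * Y + z = K))).map (fun z => [X, Y, z]) := by
              funext acc' Y; exact hz acc' Y
            rw [hfun]
        _ = acc ++ (PySem.List.pyRange 1 (K + 1) 1).flatMap (fun Y =>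
              ((PySem.List.pyRange 1 (K + 1) 1).filter
                (fun z => decide (X * Y + z = K))).map (fun z => [X, Y, z])) :=
            PySem.List.foldl_append_eq_flatMap _ _ _
        _ = acc ++ pvRow K X := by rw [pv_inner_eq_row K X hK hX.1]
    calc (PySem.List.pyRange 1 (K + 1) 1).foldl (fun acc X =>
          (PySem.List.pyRange 1 (K + 1) 1).foldl (fun acc Y =>
            (PySem.List.pyRange 1 (K + 1) 1).foldl (fun acc Z =>
              if X * Y + Z = K then acc ++ [[X, Y, Z]] else acc) acc) acc) []
        = (PySem.List.pyRange 1 (K + 1) 1).foldl (fun acc X => acc ++ pvRow K X) [] := by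
          apply PySem.List.foldl_congr_mem
          intro acc X hX; exact hbody acc X hX
      _ = (PySem.List.pyRange 1 (K + 1) 1).flatMap (pvRow K) := by
          rw [PySem.List.foldl_append_eq_flatMap]; rfl
  rw [hA, PySem.List.pyRange_one_append 1 K (K + 1) (by omega) (by omega)]
  -- X = K contributes nothing: (K-1)//K = 0
  have hlast : pvRow K K = [] := by
    unfold pvRow
    have : PySem.Int.floordiv (K - 1) K = 0 :=
      (PySem.Int.floordiv_eq_iff_of_pos hK).mpr (by constructor <;> nlinarith)
    rw [this, PySem.List.pyRange_one_eq_nil (by omega)]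
    rfl
  rw [List.flatMap_append, PySem.List.pyRange_one_singleton]
  simp [hlast]
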